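-- pv_equiv track=rewrite | github.com/kerisGit123/startupkit | scripts/crop-grids.py | make_even_grid
-- ===== SOURCE A (Python) =====
-- def make_even_grid(img_w, img_h, num_cols, num_rows, padding_x=30, padding_y=30, gap_x=16, gap_y=16):
--     """Fallback: generate evenly spaced card regions for a known grid layout."""
--     total_gap_x = gap_x * (num_cols - 1) + padding_x * 2
--     total_gap_y = gap_y * (num_rows - 1) + padding_y * 2
--     card_w = (img_w - total_gap_x) // num_cols
--     card_h = (img_h - total_gap_y) // num_rows
--     cards = []
--     for r in range(num_rows):
--         for c in range(num_cols):
--             x1 = padding_x + c * (card_w + gap_x)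
--             y1 = padding_y + r * (card_h + gap_y)
--             cards.append((x1, y1, x1 + card_w, y1 + card_h))
--     return cards
-- ===== SOURCE B (Python) =====
-- def make_even_grid(img_w, img_h, num_cols, num_rows, padding_x=30, padding_y=30, gap_x=16, gap_y=16):
--     """Translation-based construction into a preallocated buffer: build the first
--     row by repeatedly translating the previous cell right by one stride, then fill
--     the remaining rows by repeatedly translating the previous row down by one
--     stride.  No per-cell index arithmetic: every coordinate is a translation of
--     previously emitted geometry."""
--     if num_rows <= 0 or num_cols <= 0:
--         return []
--     card_w = (img_w - gap_x * (num_cols - 1) - 2 * padding_x) // num_cols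
--     card_h = (img_h - gap_y * (num_rows - 1) - 2 * padding_y) // num_rows
--     dx = card_w + gap_x
--     dy = card_h + gap_y
--     cells = [None] * (num_rows * num_cols)
--     row = []
--     cell = (padding_x, padding_y, padding_x + card_w, padding_y + card_h)
--     for _ in range(num_cols):
--         row.append(cell)
--         cell = (cell[0] + dx, cell[1], cell[2] + dx, cell[3])
--     cells[0:num_cols] = row
--     pos = num_cols
--     for _ in range(num_rows - 1):
--         row = [(x1, y1 + dy, x2, y2 + dy) for (x1, y1, x2, y2) in row]
--         cells[pos:pos + num_cols] = row
--         pos += num_cols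
--     return cells
-- ===== Notes on version B (the rewrite author's own statement) =====
-- stated objective: alternative
-- what changed: Replaces the nested loops that compute every cell from its (row, col) indices by multiplication with a translation-based construction: the first cell is built once, the first row grows by translating the previous cell right by one stride, and the remaining rows are produced by translating the previous row down by one stride into a preallocated flat buffer.
import Mathlib
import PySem

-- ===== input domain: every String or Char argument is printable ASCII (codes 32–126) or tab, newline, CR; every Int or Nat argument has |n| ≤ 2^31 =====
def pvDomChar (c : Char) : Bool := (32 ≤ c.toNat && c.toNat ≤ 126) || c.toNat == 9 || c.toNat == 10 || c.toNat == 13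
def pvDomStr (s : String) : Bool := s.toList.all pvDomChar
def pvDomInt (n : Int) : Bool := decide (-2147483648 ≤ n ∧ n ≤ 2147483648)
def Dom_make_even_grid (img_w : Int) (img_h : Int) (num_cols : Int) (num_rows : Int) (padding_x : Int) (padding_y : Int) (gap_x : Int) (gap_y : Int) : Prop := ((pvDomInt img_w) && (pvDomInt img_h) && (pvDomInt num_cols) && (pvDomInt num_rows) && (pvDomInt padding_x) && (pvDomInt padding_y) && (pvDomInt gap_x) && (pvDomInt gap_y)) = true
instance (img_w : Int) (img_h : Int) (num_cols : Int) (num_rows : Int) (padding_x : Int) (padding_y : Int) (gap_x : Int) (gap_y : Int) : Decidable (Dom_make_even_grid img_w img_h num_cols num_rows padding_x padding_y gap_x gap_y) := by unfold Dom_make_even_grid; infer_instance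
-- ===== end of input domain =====

-- B replaces A's index-arithmetic nested loops by a translation-based construction (build a base cell, translate it to grow the first row, translate that row to grow the grid); alternative decomposition, same cost.


-- ===== PORT A =====
def make_even_grid (img_w : Int) (img_h : Int) (num_cols : Int) (num_rows : Int) (padding_x : Int) (padding_y : Int) (gap_x : Int) (gap_y : Int) : List (Int × Int × Int × Int) :=
  let total_gap_x := gap_x * (num_cols - 1) + padding_x * 2
  let total_gap_y := gap_y * (num_rows - 1) + padding_y * 2
  let card_w := PySem.Int.floordiv (img_w - total_gap_x) num_cols
  let card_h := PySem.Int.floordiv (img_h - total_gap_y) num_rows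
  (PySem.List.pyRange 0 num_rows 1).foldl (fun cards r =>
    (PySem.List.pyRange 0 num_cols 1).foldl (fun cards c =>
      let x1 := padding_x + c * (card_w + gap_x)
      let y1 := padding_y + r * (card_h + gap_y)
      cards ++ [(x1, y1, x1 + card_w, y1 + card_h)]) cards) []

-- ===== PORT B =====
-- Source B's preallocated flat buffer, filled strictly left to right (first row, then each
-- translated row written after it), is modelled as the list of already filled cells.
def make_even_grid_alt (img_w : Int) (img_h : Int) (num_cols : Int) (num_rows : Int) (padding_x : Int) (padding_y : Int) (gap_x : Int) (gap_y : Int) : List (Int × Int × Int × Int) :=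
  if num_rows ≤ 0 ∨ num_cols ≤ 0 then [] else
  let card_w := PySem.Int.floordiv (img_w - gap_x * (num_cols - 1) - 2 * padding_x) num_cols
  let card_h := PySem.Int.floordiv (img_h - gap_y * (num_rows - 1) - 2 * padding_y) num_rows
  let dx := card_w + gap_x
  let dy := card_h + gap_y
  let rc := (PySem.List.pyRange 0 num_cols 1).foldl
      (fun (s : List (Int × Int × Int × Int) × (Int × Int × Int × Int)) _ =>
        (s.1 ++ [s.2], (s.2.1 + dx, s.2.2.1, s.2.2.2.1 + dx, s.2.2.2.2)))
      ([], (padding_x, padding_y, padding_x + card_w, padding_y + card_h))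
  let gr := (PySem.List.pyRange 0 (num_rows - 1) 1).foldl
      (fun (s : List (Int × Int × Int × Int) × List (Int × Int × Int × Int)) _ =>
        let row' := s.2.map (fun p => (p.1, p.2.1 + dy, p.2.2.1, p.2.2.2 + dy))
        (s.1 ++ row', row'))
      (rc.1, rc.1)
  gr.1

-- ===== PRECONDITION & SPEC =====
-- Pre_ excludes num_cols = 0 or num_rows = 0, on which A raises ZeroDivisionError at the '//'.
def Pre_make_even_grid (img_w : Int) (img_h : Int) (num_cols : Int) (num_rows : Int) (padding_x : Int) (padding_y : Int) (gap_x : Int) (gap_y : Int) : Prop := num_cols ≠ 0 ∧ num_rows ≠ 0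
instance (img_w : Int) (img_h : Int) (num_cols : Int) (num_rows : Int) (padding_x : Int) (padding_y : Int) (gap_x : Int) (gap_y : Int) : Decidable (Pre_make_even_grid img_w img_h num_cols num_rows padding_x padding_y gap_x gap_y) := by unfold Pre_make_even_grid; infer_instance
def pvWitness_make_even_grid : Int × Int × Int × Int × Int × Int × Int × Int := (640, 480, 3, 2, 30, 30, 16, 16)

def Spec_make_even_grid (img_w : Int) (img_h : Int) (num_cols : Int) (num_rows : Int) (padding_x : Int) (padding_y : Int) (gap_x : Int) (gap_y : Int) (out : List (Int × Int × Int × Int)) : Prop := out = make_even_grid_alt img_w img_h num_cols num_rows padding_x padding_y gap_x gap_y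
instance (img_w : Int) (img_h : Int) (num_cols : Int) (num_rows : Int) (padding_x : Int) (padding_y : Int) (gap_x : Int) (gap_y : Int) (out : List (Int × Int × Int × Int)) : Decidable (Spec_make_even_grid img_w img_h num_cols num_rows padding_x padding_y gap_x gap_y out) := by unfold Spec_make_even_grid; infer_instance

-- ===== CLAIM =====
def Claim_equal_make_even_grid : Prop := ∀ (img_w : Int) (img_h : Int) (num_cols : Int) (num_rows : Int) (padding_x : Int) (padding_y : Int) (gap_x : Int) (gap_y : Int), Dom_make_even_grid img_w img_h num_cols num_rows padding_x padding_y gap_x gap_y → Pre_make_even_grid img_w img_h num_cols num_rows padding_x padding_y gap_x gap_y → Spec_make_even_grid img_w img_h num_cols num_rows padding_x padding_y gap_x gap_y (make_even_grid img_w img_h num_cols num_rows padding_x padding_y gap_x gap_y)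

-- ===== LEMMAS AND PROOFS =====

-- a fold whose body ignores both the accumulator update and the element is the identity
theorem pv_foldl_const {α β : Type} (l : List α) (init : β) :
    l.foldl (fun acc _ => acc) init = init := by
  induction l generalizing init with
  | nil => rfl
  | cons a l ih => simpa using ih init

-- A's nested append-singleton loop equals a flatMap of per-row maps.
theorem pv_foldl_grid {α β γ : Type} (rows : List α) (cols : List β) (f : α → β → γ) (init : List γ) :
    rows.foldl (fun acc r => cols.foldl (fun acc c => acc ++ [f r c]) acc) init
      = init ++ rows.flatMap (fun r => cols.map (f r)) := by
  induction rows generalizing init with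
  | nil => simp
  | cons r rs ih =>
      rw [List.foldl_cons, PySem.List.foldl_append_singleton_eq_map, ih,
        List.flatMap_cons, List.append_assoc]

-- B's row loop: append the current cell, translate it right by dx.
theorem pv_foldl_iterx {α : Type} (dx : Int) (l : List α)
    (row : List (Int × Int × Int × Int)) (cell : Int × Int × Int × Int) :
    l.foldl (fun s _ => (s.1 ++ [s.2], (s.2.1 + dx, s.2.2.1, s.2.2.2.1 + dx, s.2.2.2.2))) (row, cell)
      = (row ++ (List.range l.length).map
            (fun i : Nat => (cell.1 + (i : Int) * dx, cell.2.1, cell.2.2.1 + (i : Int) * dx, cell.2.2.2)),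
         (cell.1 + l.length * dx, cell.2.1, cell.2.2.1 + l.length * dx, cell.2.2.2)) := by
  induction l generalizing row cell with
  | nil => simp
  | cons a l ih =>
      rw [List.foldl_cons, ih]
      dsimp only
      refine Prod.ext ?_ ?_
      · rw [List.length_cons, List.range_succ_eq_map, List.map_cons, List.map_map,
          List.append_assoc, List.singleton_append]
        refine congrArg (row ++ ·) ?_
        rw [show ((cell.1 + ((0 : Nat) : Int) * dx, cell.2.1,
            cell.2.2.1 + ((0 : Nat) : Int) * dx, cell.2.2.2) : Int × Int × Int × Int) = cell by simp]
        refine congrArg (cell :: ·) ?_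
        refine List.map_congr_left fun i _ => ?_
        dsimp only [Function.comp]
        refine Prod.ext ?_ (Prod.ext ?_ (Prod.ext ?_ ?_)) <;> (push_cast; ring)
      · rw [List.length_cons]
        refine Prod.ext ?_ (Prod.ext ?_ (Prod.ext ?_ ?_)) <;> (push_cast; ring)

-- B's grid loop: translate the current row down by dy, then append it.
theorem pv_foldl_itery {α : Type} (dy : Int) (l : List α)
    (grid row : List (Int × Int × Int × Int)) :
    l.foldl (fun s _ =>
        let row' := s.2.map (fun p => (p.1, p.2.1 + dy, p.2.2.1, p.2.2.2 + dy))
        (s.1 ++ row', row')) (grid, row)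
      = (grid ++ (List.range l.length).flatMap
            (fun i : Nat => row.map (fun p =>
              (p.1, p.2.1 + ((i : Int) + 1) * dy, p.2.2.1, p.2.2.2 + ((i : Int) + 1) * dy))),
         row.map (fun p => (p.1, p.2.1 + (l.length : Int) * dy, p.2.2.1, p.2.2.2 + (l.length : Int) * dy))) := by
  induction l generalizing grid row with
  | nil => simp
  | cons a l ih =>
      rw [List.foldl_cons]
      dsimp only
      rw [ih]
      refine Prod.ext ?_ ?_
      · rw [List.length_cons, List.range_succ_eq_map, List.flatMap_cons, List.flatMap_map,
          List.append_assoc]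
        refine congrArg (grid ++ ·) ?_
        congr 1
        · refine List.map_congr_left fun p _ => ?_
          refine Prod.ext ?_ (Prod.ext ?_ (Prod.ext ?_ ?_)) <;> (push_cast; ring)
        · refine congrArg (fun f => List.flatMap f (List.range l.length)) ?_
          funext i
          rw [List.map_map]
          refine List.map_congr_left fun p _ => ?_
          dsimp only [Function.comp]
          refine Prod.ext ?_ (Prod.ext ?_ (Prod.ext ?_ ?_)) <;> (push_cast; ring)
      · rw [List.length_cons, List.map_map]
        refine List.map_congr_left fun p _ => ?_
        dsimp only [Function.comp]
        refine Prod.ext ?_ (Prod.ext ?_ (Prod.ext ?_ ?_)) <;> (push_cast; ring)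

theorem make_even_grid_spec : Claim_equal_make_even_grid := by
  intro img_w img_h num_cols num_rows padding_x padding_y gap_x gap_y _ _
  by_cases hr : num_rows ≤ 0 ∨ num_cols ≤ 0
  · rcases hr with h | h
    · simp [Spec_make_even_grid, make_even_grid, make_even_grid_alt,
        PySem.List.pyRange_one_eq_nil h, h]
    · simp [Spec_make_even_grid, make_even_grid, make_even_grid_alt,
        PySem.List.pyRange_one_eq_nil h, h, pv_foldl_const]
  · push_neg at hr
    simp only [Spec_make_even_grid, make_even_grid, make_even_grid_alt,
      if_neg (by push_neg; exact hr : ¬(num_rows ≤ 0 ∨ num_cols ≤ 0))]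
    have hW : img_w - (gap_x * (num_cols - 1) + padding_x * 2)
        = img_w - gap_x * (num_cols - 1) - 2 * padding_x := by ring
    have hH : img_h - (gap_y * (num_rows - 1) + padding_y * 2)
        = img_h - gap_y * (num_rows - 1) - 2 * padding_y := by ring
    rw [hW, hH]
    set cw := PySem.Int.floordiv (img_w - gap_x * (num_cols - 1) - 2 * padding_x) num_cols with hcw
    set ch := PySem.Int.floordiv (img_h - gap_y * (num_rows - 1) - 2 * padding_y) num_rows with hch
    rw [pv_foldl_grid, pv_foldl_iterx, pv_foldl_itery]
    simp only [List.nil_append, PySem.List.pyRange_one, List.flatMap_map, List.map_map,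
      List.length_map, List.length_range, Int.sub_zero, zero_add]
    have hnr : num_rows.toNat = (num_rows - 1).toNat + 1 := by
      rcases hr with ⟨h1, _⟩; omega
    rw [hnr, List.range_succ_eq_map, List.flatMap_cons, List.flatMap_map]
    congr 1
    · refine List.map_congr_left fun c _ => ?_
      dsimp only [Function.comp]
      refine Prod.ext ?_ (Prod.ext ?_ (Prod.ext ?_ ?_)) <;> (push_cast; ring)
    · refine congrArg (fun f => List.flatMap f (List.range (num_rows - 1).toNat)) ?_
      funext i
      refine List.map_congr_left fun c _ => ?_
      dsimp only [Function.comp]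
      refine Prod.ext ?_ (Prod.ext ?_ (Prod.ext ?_ ?_)) <;> (push_cast; ring)

-- ===== VERDICT =====
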